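-- pv_equiv track=rewrite | github.com/toglok/Octra | octra.py | verify_address_format
-- ===== SOURCE A (Python) =====
-- def verify_address_format(address: str) -> bool:
--     if not address.startswith("oct"):
--         return False
--     base58_alphabet = "123456789ABCDEFGHJKLMNPQRSTUVWXYZabcdefghijkmnopqrstuvwxyz"
--     base58_part = address[3:]
--     if not (44 <= len(address) <= 47):
--         return False
--     return all(char in base58_alphabet for char in base58_part)
-- ===== SOURCE B (Python) =====
-- def verify_address_format(address: str) -> bool:
--     # Deterministic finite automaton over the raw string: states 0,1,2 expect
--     # 'o','c','t'; state 3 consumes base58 body characters (checked by an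
--     # arithmetic character-class test, no alphabet lookup); -1 would be dead,
--     # reported immediately.  Accept iff we end in state 3 with length 44..47.
--     state = 0
--     for c in address:
--         if state == 0:
--             state = 1 if c == 'o' else -1
--         elif state == 1:
--             state = 2 if c == 'c' else -1
--         elif state == 2:
--             state = 3 if c == 't' else -1
--         else:
--             if not ('1' <= c <= '9'
--                     or ('A' <= c <= 'Z' and c != 'I' and c != 'O')
--                     or ('a' <= c <= 'z' and c != 'l')):
--                 state = -1
--         if state == -1:
--             return False
--     return state == 3 and 44 <= len(address) <= 47
-- ===== Notes on version B (the rewrite author's own statement) =====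
-- stated objective: alternative
-- what changed: Replaces A's staged startswith/len/all-membership-in-alphabet-string checks with a deterministic finite automaton driven over the raw string by an integer state, whose body state validates characters by an arithmetic character-class test (digit/upper/lower ranges minus I,O,l) instead of any alphabet lookup.
import Mathlib
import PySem

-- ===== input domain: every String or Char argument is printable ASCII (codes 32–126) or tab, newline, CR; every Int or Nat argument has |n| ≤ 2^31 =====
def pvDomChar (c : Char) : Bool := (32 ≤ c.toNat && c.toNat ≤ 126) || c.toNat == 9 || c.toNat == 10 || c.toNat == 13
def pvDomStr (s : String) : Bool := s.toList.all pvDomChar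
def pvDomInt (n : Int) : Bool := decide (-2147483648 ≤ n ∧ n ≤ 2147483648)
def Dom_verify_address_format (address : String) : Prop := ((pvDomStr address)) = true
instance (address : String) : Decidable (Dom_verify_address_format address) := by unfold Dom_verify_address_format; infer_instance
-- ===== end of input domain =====

-- B replaces A's staged startswith/len/all-in-alphabet checks by a deterministic finite
-- automaton over the raw string whose body state validates characters by arithmetic
-- character ranges instead of an alphabet lookup (objective: alternative).


-- ===== PORT A =====
def verify_address_format (address : String) : Bool :=
  if ¬ (PySem.Str.startswith address "oct" = true) then false
  else
    let base58_alphabet : String := "123456789ABCDEFGHJKLMNPQRSTUVWXYZabcdefghijkmnopqrstuvwxyz"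
    let base58_part : String := PySem.Str.slice address (some 3) none
    if ¬ (44 ≤ PySem.Str.len address ∧ PySem.Str.len address ≤ 47) then false
    else base58_part.toList.all (fun ch => PySem.Str.isIn (String.ofList [ch]) base58_alphabet)

-- ===== PORT B =====
-- the arithmetic character-class test of Source B's body state
def pvB58Char (c : Char) : Bool :=
  (decide ('1' ≤ c) && decide (c ≤ '9'))
    || (decide ('A' ≤ c) && decide (c ≤ 'Z') && decide (c ≠ 'I') && decide (c ≠ 'O'))
    || (decide ('a' ≤ c) && decide (c ≤ 'z') && decide (c ≠ 'l'))

-- the if/elif chain updating the automaton state for one character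
def pvStep (state : Int) (c : Char) : Int :=
  if state = 0 then (if c = 'o' then 1 else -1)
  else if state = 1 then (if c = 'c' then 2 else -1)
  else if state = 2 then (if c = 't' then 3 else -1)
  else if ¬ pvB58Char c then -1 else state

-- 'for c in address: …; if state == -1: return False' (none = early 'return False')
def pvLoop : List Char → Int → Option Int
  | [], state => some state
  | c :: rest, state =>
    let s := pvStep state c
    if s = -1 then none else pvLoop rest s

def verify_address_format_alt (address : String) : Bool :=
  match pvLoop address.toList 0 with
  | none => false
  | some state =>
    decide (state = 3) && decide (44 ≤ PySem.Str.len address ∧ PySem.Str.len address ≤ 47)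

-- ===== PRECONDITION & SPEC =====
def Spec_verify_address_format (address : String) (out : Bool) : Prop := out = verify_address_format_alt address
instance (address : String) (out : Bool) : Decidable (Spec_verify_address_format address out) := by unfold Spec_verify_address_format; infer_instance

-- ===== CLAIM (what is proved, stated in full; the proofs are below) =====
def Claim_equal_verify_address_format : Prop := ∀ (address : String), Dom_verify_address_format address → Spec_verify_address_format address (verify_address_format address)

-- ===== LEMMAS AND PROOFS =====

lemma char_eq_of_toNat {a b : Char} (h : a.toNat = b.toNat) : a = b :=
  Char.ext (UInt32.toNat_inj.mp h)

lemma char_le_iff (a b : Char) : (a ≤ b) ↔ a.toNat ≤ b.toNat := by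
  rw [Char.le_def]; exact UInt32.le_iff_toNat_le

lemma mem_of_toNat_mem {c : Char} {L : List Char} (h : c.toNat ∈ L.map Char.toNat) :
    c ∈ L := by
  obtain ⟨a, ha, he⟩ := List.mem_map.mp h
  exact (char_eq_of_toNat he) ▸ ha

-- the base58 alphabet, as character codes
lemma pvAlphMap :
    (("123456789ABCDEFGHJKLMNPQRSTUVWXYZabcdefghijkmnopqrstuvwxyz" : String).toList).map Char.toNat
      = [49, 50, 51, 52, 53, 54, 55, 56, 57, 65, 66, 67, 68, 69, 70, 71, 72, 74, 75, 76,
         77, 78, 80, 81, 82, 83, 84, 85, 86, 87, 88, 89, 90, 97, 98, 99, 100, 101, 102,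
         103, 104, 105, 106, 107, 109, 110, 111, 112, 113, 114, 115, 116, 117, 118, 119,
         120, 121, 122] := by decide

lemma char_eq_iff (a b : Char) : a = b ↔ a.toNat = b.toNat :=
  ⟨fun h => h ▸ rfl, char_eq_of_toNat⟩

-- the arithmetic character class, read off on character codes
lemma pvB58Char_iff (c : Char) :
    pvB58Char c = true
      ↔ ((49 ≤ c.toNat ∧ c.toNat ≤ 57)
          ∨ (65 ≤ c.toNat ∧ c.toNat ≤ 90 ∧ c.toNat ≠ 73 ∧ c.toNat ≠ 79)
          ∨ (97 ≤ c.toNat ∧ c.toNat ≤ 122 ∧ c.toNat ≠ 108)) := by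
  unfold pvB58Char
  simp only [Bool.or_eq_true, Bool.and_eq_true, decide_eq_true_eq, ne_eq,
    char_le_iff, char_eq_iff]
  simp only [show ('1' : Char).toNat = 49 from rfl, show ('9' : Char).toNat = 57 from rfl,
    show ('A' : Char).toNat = 65 from rfl, show ('Z' : Char).toNat = 90 from rfl,
    show ('I' : Char).toNat = 73 from rfl, show ('O' : Char).toNat = 79 from rfl,
    show ('a' : Char).toNat = 97 from rfl, show ('z' : Char).toNat = 122 from rfl,
    show ('l' : Char).toNat = 108 from rfl]
  tauto

-- the arithmetic character class equals membership in A's base58 alphabet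
lemma pvB58Char_eq_mem (c : Char) :
    pvB58Char c
      = decide (c ∈ ("123456789ABCDEFGHJKLMNPQRSTUVWXYZabcdefghijkmnopqrstuvwxyz" : String).toList) := by
  rw [Bool.eq_iff_iff, decide_eq_true_eq, pvB58Char_iff]
  constructor
  · intro hd
    apply mem_of_toNat_mem
    rw [pvAlphMap]
    simp only [List.mem_cons, List.not_mem_nil, or_false]
    omega
  · intro h
    have hm := List.mem_map_of_mem (f := Char.toNat) h
    rw [pvAlphMap] at hm
    simp only [List.mem_cons, List.not_mem_nil, or_false] at hm
    omega

-- once in the body state, the automaton accepts exactly all-base58 tails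
lemma pvLoop_three (l : List Char) :
    pvLoop l 3 = if l.all pvB58Char then some 3 else none := by
  induction l with
  | nil => simp [pvLoop]
  | cons c rest ih =>
    by_cases h : pvB58Char c = true
    · simp [pvLoop, pvStep, h, ih]
    · simp [pvLoop, pvStep, h]

-- the whole automaton: accepted final state 3 iff "oct"-prefix and base58 tail
lemma pvLoop_zero (l : List Char) :
    (match pvLoop l 0 with
      | none => false
      | some s => decide (s = 3))
      = (decide (['o', 'c', 't'] <+: l) && (l.drop 3).all pvB58Char) := by
  match l with
  | [] => simp [pvLoop]
  | [a] =>
    by_cases h : a = 'o' <;>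
      simp [pvLoop, pvStep, h, List.cons_prefix_cons]
  | [a, b] =>
    by_cases h : a = 'o' <;> by_cases h2 : b = 'c' <;>
      simp [pvLoop, pvStep, h, h2, List.cons_prefix_cons]
  | a :: b :: d :: rest =>
    by_cases h : a = 'o' <;> by_cases h2 : b = 'c' <;> by_cases h3 : d = 't' <;>
      simp [pvLoop, pvStep, h, h2, h3, List.cons_prefix_cons, pvLoop_three] <;>
      first
        | (intro he; exact absurd he.symm (by assumption))
        | (by_cases hall : ∀ x ∈ rest, pvB58Char x = true
           · rw [if_pos hall]
             exact (List.all_eq_true.mpr hall).symm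
           · rw [if_neg hall]
             have hne : rest.all pvB58Char ≠ true := fun hh => hall (List.all_eq_true.mp hh)
             exact (Bool.eq_false_iff.mpr hne).symm)

lemma isIn_single (ch : Char) (s : String) :
    PySem.Str.isIn (String.ofList [ch]) s = decide (ch ∈ s.toList) := by
  rw [Bool.eq_iff_iff, decide_eq_true_iff, PySem.Str.isIn_iff_infix]
  have hl : (String.ofList [ch]).toList = [ch] := by simp
  rw [hl]
  constructor
  · intro h
    exact List.singleton_sublist.mp h.sublist
  · intro h
    obtain ⟨s₁, s₂, hs⟩ := List.append_of_mem h
    exact ⟨s₁, s₂, by rw [hs]; simp⟩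

-- ===== VERDICT (by name: the statement is the Claim_ definition above) =====
theorem verify_address_format_spec : Claim_equal_verify_address_format := by
  intro address _
  unfold Spec_verify_address_format verify_address_format verify_address_format_alt
  have hB : (match pvLoop address.toList 0 with
      | none => false
      | some state =>
        decide (state = 3) && decide (44 ≤ PySem.Str.len address ∧ PySem.Str.len address ≤ 47))
      = ((match pvLoop address.toList 0 with
          | none => false
          | some s => decide (s = 3))
        && decide (44 ≤ PySem.Str.len address ∧ PySem.Str.len address ≤ 47)) := by
    cases pvLoop address.toList 0 <;> simp
  rw [hB, pvLoop_zero]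
  have hoct : ("oct" : String).toList = ['o', 'c', 't'] := by simp
  have hsw : PySem.Str.startswith address "oct"
      = decide (['o', 'c', 't'] <+: address.toList) := by
    rw [Bool.eq_iff_iff, decide_eq_true_iff, PySem.Str.startswith_eq, ← hoct,
      PySem.Chars.startswith_iff]
  by_cases hp : ['o', 'c', 't'] <+: address.toList
  · rw [if_neg (not_not_intro (show PySem.Str.startswith address "oct" = true from by
      rw [hsw]; exact decide_eq_true hp))]
    rw [decide_eq_true hp, Bool.true_and]
    have hdrop : (PySem.Str.slice address (some 3) none).toList = address.toList.drop 3 := by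
      rw [PySem.Str.toList_slice, PySem.Chars.slice_eq_listSlice,
        PySem.List.slice_from address.toList (show (0 : Int) ≤ 3 by norm_num)]
      rfl
    have hfun : (fun ch => PySem.Str.isIn (String.ofList [ch])
          "123456789ABCDEFGHJKLMNPQRSTUVWXYZabcdefghijkmnopqrstuvwxyz")
        = pvB58Char := by
      funext ch
      rw [isIn_single, pvB58Char_eq_mem]
    by_cases hl : 44 ≤ PySem.Str.len address ∧ PySem.Str.len address ≤ 47
    · rw [if_neg (not_not_intro hl), decide_eq_true hl, Bool.and_true, hdrop, hfun]
    · rw [if_pos hl, decide_eq_false hl, Bool.and_false]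
  · rw [if_pos (show ¬(PySem.Str.startswith address "oct" = true) from by
      rw [hsw]; simp only [decide_eq_true_eq]; exact hp)]
    rw [decide_eq_false hp, Bool.false_and, Bool.false_and]
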